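-- pv_equiv track=rewrite | github.com/SquidProjects/SonarMapper | code/georef.py | returnNonZeroColour
-- ===== SOURCE A (Python) =====
-- def returnNonZeroColour(colourVect):
--     returnColour=(0,0,0,0)
--     counter=0
--     for colour in colourVect:
--         if(colour[0]>0 or colour[1]>0 or colour[2]>0):
--             returnColour=colour
--             counter=counter+1
--     if(counter<3):
--         returnColour=(0,0,0,0)
--     return returnColour
-- ===== SOURCE B (Python) =====
-- def returnNonZeroColour(colourVect):
--     if sum(1 for c in colourVect if c[0] > 0 or c[1] > 0 or c[2] > 0) < 3:
--         return (0, 0, 0, 0)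
--     return next(c for c in reversed(colourVect) if c[0] > 0 or c[1] > 0 or c[2] > 0)
-- ===== Notes on version B (the rewrite author's own statement) =====
-- stated objective: alternative
-- what changed: Replaces A's single forward pass threading a (last, counter) accumulator with two staged generator passes: a counting pass (sum) decides the threshold, and the result is found by an early-exit backward search over reversed(colourVect).
import Mathlib
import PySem

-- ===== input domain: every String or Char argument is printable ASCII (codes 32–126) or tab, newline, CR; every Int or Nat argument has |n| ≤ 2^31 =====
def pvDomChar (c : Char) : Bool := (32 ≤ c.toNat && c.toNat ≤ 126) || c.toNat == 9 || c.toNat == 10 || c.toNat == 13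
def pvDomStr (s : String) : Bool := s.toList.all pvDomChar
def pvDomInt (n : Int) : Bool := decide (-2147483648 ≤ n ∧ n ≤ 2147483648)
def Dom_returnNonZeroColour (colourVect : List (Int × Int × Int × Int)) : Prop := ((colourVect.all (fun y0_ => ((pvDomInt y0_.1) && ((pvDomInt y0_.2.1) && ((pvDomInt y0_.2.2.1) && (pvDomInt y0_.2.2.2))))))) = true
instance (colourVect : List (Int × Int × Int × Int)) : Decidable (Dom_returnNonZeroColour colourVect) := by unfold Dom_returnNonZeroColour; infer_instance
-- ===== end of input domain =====

-- B: two staged generator passes — a counting pass for the threshold, then an early-exit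
-- backward search over the reversed list for the result (objective: alternative decomposition).
-- ===== PORT A =====
def returnNonZeroColour (colourVect : List (Int × Int × Int × Int)) : Int × Int × Int × Int :=
  let st := colourVect.foldl (fun (acc : (Int × Int × Int × Int) × Int) colour =>
      if colour.1 > 0 || colour.2.1 > 0 || colour.2.2.1 > 0 then (colour, acc.2 + 1) else acc)
    ((0, 0, 0, 0), 0)
  if st.2 < 3 then (0, 0, 0, 0) else st.1

-- ===== PORT B =====
def returnNonZeroColour_alt (colourVect : List (Int × Int × Int × Int)) : Int × Int × Int × Int :=
  -- sum(1 for c in colourVect if q c) → countP; next over reversed(...) → find? on reverse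
  if colourVect.countP (fun c => c.1 > 0 || c.2.1 > 0 || c.2.2.1 > 0) < 3 then (0, 0, 0, 0)
  else (colourVect.reverse.find? (fun c => c.1 > 0 || c.2.1 > 0 || c.2.2.1 > 0)).getD (0, 0, 0, 0)

-- ===== PRECONDITION & SPEC =====
def Spec_returnNonZeroColour (colourVect : List (Int × Int × Int × Int)) (out : Int × Int × Int × Int) : Prop := out = returnNonZeroColour_alt colourVect
instance (colourVect : List (Int × Int × Int × Int)) (out : Int × Int × Int × Int) : Decidable (Spec_returnNonZeroColour colourVect out) := by unfold Spec_returnNonZeroColour; infer_instance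

-- ===== CLAIM (what is proved, stated in full; the proofs are below) =====
def Claim_equal_returnNonZeroColour : Prop := ∀ (colourVect : List (Int × Int × Int × Int)), Dom_returnNonZeroColour colourVect → Spec_returnNonZeroColour colourVect (returnNonZeroColour colourVect)

-- ===== LEMMAS AND PROOFS =====

theorem rnzc_fold (xs : List (Int × Int × Int × Int)) (r : Int × Int × Int × Int) (c : Int) :
    xs.foldl (fun (acc : (Int × Int × Int × Int) × Int) colour =>
      if colour.1 > 0 || colour.2.1 > 0 || colour.2.2.1 > 0 then (colour, acc.2 + 1) else acc) (r, c)
    = ((xs.filter (fun x => x.1 > 0 || x.2.1 > 0 || x.2.2.1 > 0)).getLastD r,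
       c + (xs.filter (fun x => x.1 > 0 || x.2.1 > 0 || x.2.2.1 > 0)).length) := by
  induction xs generalizing r c with
  | nil => simp
  | cons x xs ih =>
    by_cases h : (x.1 > 0 || x.2.1 > 0 || x.2.2.1 > 0) = true
    · rw [List.foldl_cons, if_pos h, ih]
      simp only [List.filter_cons, if_pos h, List.getLastD_cons, List.length_cons]
      refine Prod.ext rfl ?_
      push_cast
      ring
    · rw [List.foldl_cons, if_neg (by simp [h]), ih]
      simp only [List.filter_cons, if_neg h]

theorem rnzc_find_reverse {α : Type} (xs : List α) (p : α → Bool) :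
    xs.reverse.find? p = (xs.filter p).getLast? := by
  rw [← List.head?_filter, List.filter_reverse, List.head?_reverse]

-- ===== VERDICT (by name: the statement is the Claim_ definition above) =====
theorem returnNonZeroColour_spec : Claim_equal_returnNonZeroColour := by
  intro colourVect _
  unfold Spec_returnNonZeroColour returnNonZeroColour returnNonZeroColour_alt
  rw [rnzc_fold, rnzc_find_reverse, List.countP_eq_length_filter]
  set hits := colourVect.filter (fun x => x.1 > 0 || x.2.1 > 0 || x.2.2.1 > 0) with hh
  by_cases h3 : hits.length < 3
  · rw [if_pos (by push_cast; omega), if_pos h3]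
  · rw [if_neg (by push_cast; omega), if_neg h3, List.getLastD_eq_getLast?]
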